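-- pv_equiv track=rewrite | github.com/RIshimoto/AtCoder_myPractice | ARC/ARC140/arc140_b.py | solve
-- ===== SOURCE A (Python) =====
-- def solve(N, S):
--     import heapq
--     cnt = 0
--     pool = 0
--     for i in range(1, N-1):
--         if S[i-1:i+2] == 'ARC':
--             cnt_a = 0
--             j = i - 1
--             while j >= 0 and S[j] == 'A':
--                 cnt_a += 1
--                 j -= 1
--             cnt_c = 0
--             j = i + 1
--             while j < N and S[j] == 'C':
--                 cnt_c += 1
--                 j += 1
--             cnt += 1
--             pool += min(cnt_a, cnt_c)
--     ans = min(cnt * 2, pool)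
--     return ans
-- ===== SOURCE B (Python) =====
-- def solve(N, S):
--     # One pass with precomputed run-length tables instead of nested re-scanning while-loops.
--     T = S[:max(N, 0)]  # the problem's string is the first N characters
--     n = len(T)
--     a_run = []  # a_run[k] = length of the 'A'-block ending at k
--     run = 0
--     for ch in T:
--         run = run + 1 if ch == 'A' else 0
--         a_run.append(run)
--     c_run = []  # c_run[k] = length of the 'C'-block starting at k
--     run = 0
--     for ch in reversed(T):
--         run = run + 1 if ch == 'C' else 0
--         c_run.append(run)
--     c_run.reverse()
--     cnt = 0
--     pool = 0
--     for i in range(1, n - 1):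
--         if T[i - 1] == 'A' and T[i] == 'R' and T[i + 1] == 'C':
--             cnt += 1
--             pool += min(a_run[i - 1], c_run[i + 1])
--     return min(2 * cnt, pool)
-- ===== Notes on version B (the rewrite author's own statement) =====
-- stated objective: alternative
-- what changed: A re-scans the whole A-run and C-run with nested while-loops at every 'ARC' occurrence; B precomputes both run-length tables in two linear sweeps and replaces each inner scan by a table lookup in a differently-shaped single pass.
import Mathlib
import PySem

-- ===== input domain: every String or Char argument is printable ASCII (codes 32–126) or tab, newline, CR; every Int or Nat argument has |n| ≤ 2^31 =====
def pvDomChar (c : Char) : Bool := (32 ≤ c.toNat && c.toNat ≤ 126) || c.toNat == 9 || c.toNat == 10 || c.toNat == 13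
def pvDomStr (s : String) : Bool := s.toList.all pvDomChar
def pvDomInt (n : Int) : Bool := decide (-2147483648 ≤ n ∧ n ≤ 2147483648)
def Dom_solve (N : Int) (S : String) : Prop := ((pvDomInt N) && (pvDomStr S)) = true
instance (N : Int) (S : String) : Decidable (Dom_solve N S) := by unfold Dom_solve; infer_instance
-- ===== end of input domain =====

-- B replaces A's nested re-scanning while-loops by two run-length sweeps and one
-- table-lookup pass (objective: alternative).

-- ===== PORT A =====
-- while j >= 0 and S[j] == 'A': cnt_a += 1; j -= 1   (returns the number of iterations)
def solveRunA (L : List Char) (j : Int) : Int :=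
  if h : 0 ≤ j ∧ PySem.List.pyGetD L j ' ' = 'A' then 1 + solveRunA L (j - 1) else 0
termination_by (j + 1).toNat
decreasing_by omega

-- while j < N and S[j] == 'C': cnt_c += 1; j += 1   (inside Pre_ the loop never reads past the string)
def solveRunC (N : Int) (L : List Char) (j : Int) : Int :=
  if h : j < N ∧ PySem.List.pyGetD L j ' ' = 'C' then 1 + solveRunC N L (j + 1) else 0
termination_by (N - j).toNat
decreasing_by omega

def solve (N : Int) (S : String) : Int :=
  let L := S.toList
  let st := (PySem.List.pyRange 1 (N - 1) 1).foldl
    (fun (st : Int × Int) i =>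
      if PySem.List.slice L (some (i - 1)) (some (i + 2)) = ['A', 'R', 'C'] then
        (st.1 + 1, st.2 + min (solveRunA L (i - 1)) (solveRunC N L (i + 1)))
      else st)
    (0, 0)
  min (st.1 * 2) st.2

-- ===== PORT B =====
-- run = run + 1 if ch == 'A' else 0; a_run.append(run)
def altRuns (target : Char) (T : List Char) (run : Int) : List Int :=
  match T with
  | [] => []
  | ch :: t =>
      let r := if ch = target then run + 1 else 0
      r :: altRuns target t r

def solve_alt (N : Int) (S : String) : Int :=
  let T := PySem.List.slice S.toList none (some (max N 0))
  let n : Int := T.length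
  let aRun := altRuns 'A' T 0
  let cRun := (altRuns 'C' T.reverse 0).reverse
  let st := (PySem.List.pyRange 1 (n - 1) 1).foldl
    (fun (st : Int × Int) i =>
      if PySem.List.pyGetD T (i - 1) ' ' = 'A' ∧ PySem.List.pyGetD T i ' ' = 'R' ∧
         PySem.List.pyGetD T (i + 1) ' ' = 'C' then
        (st.1 + 1, st.2 + min (PySem.List.pyGetD aRun (i - 1) 0) (PySem.List.pyGetD cRun (i + 1) 0))
      else st)
    (0, 0)
  min (2 * st.1) st.2

-- ===== PRECONDITION & SPEC =====
-- Pre_ excludes exactly the inputs on which A raises IndexError: N larger than the length of S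
-- while S ends in "AR" followed by one or more 'C' (the C-scan then runs past the end of S);
-- on those inputs B returns the run-table answer for S itself.
def Pre_solve (N : Int) (S : String) : Prop :=
  ¬ (let L := S.toList
     let t := (L.reverse.takeWhile (fun c => c = 'C')).length
     (L.length : Int) < N ∧ 1 ≤ t ∧ t + 2 ≤ L.length ∧
     L[L.length - t - 2]? = some 'A' ∧ L[L.length - t - 1]? = some 'R')
instance (N : Int) (S : String) : Decidable (Pre_solve N S) := by
  unfold Pre_solve; infer_instance

def pvWitness_solve : Int × String := (4, "AARC")

def Spec_solve (N : Int) (S : String) (out : Int) : Prop := out = solve_alt N S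
instance (N : Int) (S : String) (out : Int) : Decidable (Spec_solve N S out) := by
  unfold Spec_solve; infer_instance

-- ===== CLAIM (what is proved, stated in full; the proofs are below) =====
def Claim_equal_solve : Prop := ∀ (N : Int) (S : String), Dom_solve N S → Pre_solve N S → Spec_solve N S (solve N S)


-- ===== LEMMAS AND PROOFS =====

-- length of the maximal block of `c`s at the back / front of a list
def pvBack (c : Char) (U : List Char) : Nat := (U.reverse.takeWhile (fun x => x = c)).length
def pvFront (c : Char) (U : List Char) : Nat := (U.takeWhile (fun x => x = c)).length

theorem pvBack_append_self (c : Char) (U : List Char) : pvBack c (U ++ [c]) = pvBack c U + 1 := by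
  simp [pvBack]

theorem pvBack_append_ne (c d : Char) (U : List Char) (h : ¬ d = c) : pvBack c (U ++ [d]) = 0 := by
  simp [pvBack, h]

theorem pvBack_all (c : Char) (U : List Char) (h : U.all (fun x => x = c)) : pvBack c U = U.length := by
  have : U.reverse.takeWhile (fun x => x = c) = U.reverse := by
    apply List.takeWhile_eq_self_iff.mpr; intro x hx; exact (List.all_eq_true.mp h) x (List.mem_reverse.mp hx)
  simp [pvBack, this]

theorem pvBack_cons (c x : Char) (U : List Char) :
    pvBack c (x :: U) =
      if U.all (fun y => y = c) then (if x = c then U.length + 1 else U.length) else pvBack c U := by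
  have hrev : (x :: U).reverse = U.reverse ++ [x] := by simp
  by_cases hall : U.all (fun y => y = c)
  · have hlen : (U.reverse.takeWhile (fun y => y = c)).length = U.reverse.length := by
      have := pvBack_all c U hall
      simpa [pvBack] using this
    by_cases hx : x = c
    · simp [pvBack, hrev, List.takeWhile_append, hlen, hall, hx]
    · simp [pvBack, hrev, List.takeWhile_append, hlen, hx]
  · have hlt : (U.reverse.takeWhile (fun y => y = c)).length ≠ U.length := by
      intro hEq
      apply hall
      have hEq' : U.reverse.takeWhile (fun y => y = c) = U.reverse :=
        (List.takeWhile_prefix (l := U.reverse) (fun y => y = c)).eq_of_length (by simpa using hEq)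
      refine List.all_eq_true.mpr (fun x hx => ?_)
      exact List.takeWhile_eq_self_iff.mp hEq' x (List.mem_reverse.mpr hx)
    simp [pvBack, hrev, List.takeWhile_append, hlt, hall]

theorem pvFront_cons (c x : Char) (U : List Char) :
    pvFront c (x :: U) = if x = c then pvFront c U + 1 else 0 := by
  by_cases h : x = c <;> simp [pvFront, h]

theorem pvBack_reverse (c : Char) (V : List Char) : pvBack c V.reverse = pvFront c V := by
  simp [pvBack, pvFront]

theorem solveRunA_step (L : List Char) (j : Int) (h0 : 0 ≤ j) (h1 : j < (L.length : Int)) :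
    solveRunA L j =
      if L[j.toNat]'(by omega) = 'A' then 1 + solveRunA L (j - 1) else 0 := by
  rw [solveRunA, PySem.List.pyGetD_eq_getElem L ' ' h0 h1]
  by_cases hA : L[j.toNat]'(by omega) = 'A' <;> simp [h0, hA]

theorem solveRunA_neg (L : List Char) : solveRunA L (-1) = 0 := by
  rw [solveRunA]; simp

theorem solveRunA_eq (L : List Char) : ∀ (k : Nat), k < L.length →
    solveRunA L (k : Int) = (pvBack 'A' (L.take (k + 1)) : Int) := by
  intro k
  induction k with
  | zero =>
    intro hk
    rw [show ((0 : Nat) : Int) = 0 by simp, solveRunA_step L 0 (by omega) (by exact_mod_cast hk)]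
    have ht : L.take 1 = [] ++ [L[0]'hk] := by
      simpa using List.take_succ_eq_append_getElem hk
    by_cases hA : L[(0 : Int).toNat]'(by simpa using hk) = 'A'
    · have hA' : L[0]'hk = 'A' := by simpa using hA
      rw [if_pos hA, ht, hA', pvBack_append_self]
      simp [pvBack, solveRunA_neg]
    · have hA' : ¬ L[0]'hk = 'A' := by simpa using hA
      rw [if_neg hA, ht, pvBack_append_ne 'A' _ [] hA']
      simp
  | succ k ih =>
    intro hk
    have hk' : k < L.length := by omega
    rw [solveRunA_step L (k + 1 : Nat) (by omega) (by exact_mod_cast hk)]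
    have htn : ((k + 1 : Nat) : Int).toNat = k + 1 := by omega
    have ht : L.take (k + 2) = L.take (k + 1) ++ [L[k + 1]'hk] := by
      simpa using List.take_succ_eq_append_getElem hk
    have hsub : ((k + 1 : Nat) : Int) - 1 = (k : Int) := by omega
    by_cases hA : L[((k + 1 : Nat) : Int).toNat]'(by omega) = 'A'
    · have hA' : L[k + 1]'hk = 'A' := by simpa [htn] using hA
      rw [if_pos hA, hsub, ih hk', ht, hA', pvBack_append_self]
      push_cast; ring
    · have hA' : ¬ L[k + 1]'hk = 'A' := by simpa [htn] using hA
      rw [if_neg hA, ht, pvBack_append_ne 'A' _ _ hA']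
      simp

theorem solveRunC_bounded (N : Int) (L : List Char) :
    ∀ (n : Nat) (j : Int), (N - j).toNat ≤ n → 0 ≤ j → j ≤ N → N ≤ (L.length : Int) →
      solveRunC N L j = min ((pvFront 'C' (L.drop j.toNat) : Int)) (N - j) := by
  intro n
  induction n with
  | zero =>
    intro j hn h0 hjN hN
    have hj : j = N := by omega
    rw [hj, solveRunC, dif_neg (by simp)]
    have : (0 : Int) ≤ (pvFront 'C' (L.drop N.toNat) : Int) := by positivity
    omega
  | succ n ih =>
    intro j hn h0 hjN hN
    by_cases hj : j = N
    · rw [hj, solveRunC, dif_neg (by simp)]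
      have : (0 : Int) ≤ (pvFront 'C' (L.drop N.toNat) : Int) := by positivity
      omega
    · have hjlt : j < N := by omega
      have hjlen : j.toNat < L.length := by omega
      have hdrop : L.drop j.toNat = L[j.toNat]'hjlen :: L.drop (j.toNat + 1) :=
        List.drop_eq_getElem_cons hjlen
      rw [solveRunC, PySem.List.pyGetD_eq_getElem L ' ' h0 (by omega)]
      have htn : (j + 1).toNat = j.toNat + 1 := by omega
      by_cases hC : L[j.toNat]'hjlen = 'C'
      · rw [dif_pos ⟨hjlt, hC⟩, ih (j + 1) (by omega) (by omega) (by omega) hN, htn,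
            hdrop, pvFront_cons, if_pos hC]
        push_cast; omega
      · rw [dif_neg (by tauto), hdrop, pvFront_cons, if_neg hC]
        simp; omega

theorem solveRunC_inner (N : Int) (L : List Char) :
    ∀ (n : Nat) (j : Int), pvFront 'C' (L.drop j.toNat) = n → 0 ≤ j →
      j.toNat + pvFront 'C' (L.drop j.toNat) < L.length →
      j + (pvFront 'C' (L.drop j.toNat) : Int) < N →
      solveRunC N L j = (pvFront 'C' (L.drop j.toNat) : Int) := by
  intro n
  induction n with
  | zero =>
    intro j hf h0 hstop hN
    have hjlen : j.toNat < L.length := by omega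
    have hdrop : L.drop j.toNat = L[j.toNat]'hjlen :: L.drop (j.toNat + 1) :=
      List.drop_eq_getElem_cons hjlen
    have hC : ¬ L[j.toNat]'hjlen = 'C' := by
      intro hC
      rw [hdrop, pvFront_cons, if_pos hC] at hf
      omega
    rw [solveRunC, PySem.List.pyGetD_eq_getElem L ' ' h0 (by omega)]
    rw [dif_neg (by tauto), hf]
    simp
  | succ n ih =>
    intro j hf h0 hstop hN
    have hjlen : j.toNat < L.length := by omega
    have hdrop : L.drop j.toNat = L[j.toNat]'hjlen :: L.drop (j.toNat + 1) :=
      List.drop_eq_getElem_cons hjlen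
    have hC : L[j.toNat]'hjlen = 'C' := by
      by_contra hC
      rw [hdrop, pvFront_cons, if_neg hC] at hf
      omega
    have hf' : pvFront 'C' (L.drop (j.toNat + 1)) = n := by
      rw [hdrop, pvFront_cons, if_pos hC] at hf
      omega
    have htn : (j + 1).toNat = j.toNat + 1 := by omega
    rw [solveRunC, PySem.List.pyGetD_eq_getElem L ' ' h0 (by omega), dif_pos ⟨by omega, hC⟩,
        ih (j + 1) (by rw [htn]; exact hf') (by omega) (by rw [htn]; omega) (by rw [htn]; push_cast; omega)]
    rw [htn, hf', hf]
    push_cast; omega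

theorem altRuns_length (c : Char) (T : List Char) (r : Int) : (altRuns c T r).length = T.length := by
  induction T generalizing r with
  | nil => simp [altRuns]
  | cons ch t ih => simp [altRuns, ih]

theorem altRuns_getElem (c : Char) : ∀ (T : List Char) (r : Int) (k : Nat) (hk : k < T.length),
    (altRuns c T r)[k]'(by rw [altRuns_length]; exact hk) =
      if (T.take (k + 1)).all (fun x => x = c) then r + ((k : Int) + 1) else (pvBack c (T.take (k + 1)) : Int) := by
  intro T
  induction T with
  | nil => intro r k hk; simp at hk
  | cons ch t ih =>
    intro r k hk
    cases k with
    | zero =>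
      by_cases hc : ch = c <;> simp [altRuns, hc, pvBack, List.takeWhile_cons]
    | succ k =>
      have hk' : k < t.length := by simpa using hk
      have : (altRuns c (ch :: t) r)[k + 1]'(by rw [altRuns_length]; exact hk) =
          (altRuns c t (if ch = c then r + 1 else 0))[k]'(by rw [altRuns_length]; exact hk') := by
        simp [altRuns]
      rw [this, ih _ k hk']
      have htake : (ch :: t).take (k + 2) = ch :: t.take (k + 1) := by simp
      rw [htake, pvBack_cons]
      by_cases hall : (t.take (k + 1)).all (fun x => x = c)
      · have hlen : (t.take (k + 1)).length = k + 1 := by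
          rw [List.length_take]; omega
        by_cases hc : ch = c
        · simp [hall, hc, hlen]; push_cast; ring
        · simp [hall, hc, hlen, pvBack_all c _ hall]
      · by_cases hc : ch = c <;> simp [hall, hc]

theorem altRuns_getElem_zero (c : Char) (T : List Char) (k : Nat) (hk : k < T.length) :
    (altRuns c T 0)[k]'(by rw [altRuns_length]; exact hk) = (pvBack c (T.take (k + 1)) : Int) := by
  rw [altRuns_getElem c T 0 k hk]
  by_cases hall : (T.take (k + 1)).all (fun x => x = c)
  · rw [if_pos hall, pvBack_all c _ hall, List.length_take]
    have : min (k + 1) T.length = k + 1 := by omega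
    rw [this]; push_cast; ring
  · rw [if_neg hall]

theorem cRun_getElem (T : List Char) (k : Nat) (hk : k < T.length) :
    ((altRuns 'C' T.reverse 0).reverse)[k]'(by simp [altRuns_length]; exact hk) =
      (pvFront 'C' (T.drop k) : Int) := by
  have hlen : (altRuns 'C' T.reverse 0).length = T.length := by simp [altRuns_length]
  have hk2 : T.length - 1 - k < T.reverse.length := by simp; omega
  rw [List.getElem_reverse]
  have step : (altRuns 'C' T.reverse 0)[(altRuns 'C' T.reverse 0).length - 1 - k]'(by omega) =
      (altRuns 'C' T.reverse 0)[T.length - 1 - k]'(by rw [altRuns_length]; simpa using hk2) := by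
    simp [hlen]
  rw [step, altRuns_getElem_zero 'C' T.reverse (T.length - 1 - k) (by simpa using hk2)]
  have h1 : T.length - 1 - k + 1 = T.length - k := by omega
  have h2 : T.reverse.take (T.length - k) = (T.drop k).reverse := by
    have hsub : T.length - (T.length - k) = k := by omega
    rw [List.take_reverse, hsub]
  rw [h1, h2, pvBack_reverse]

theorem pvFront_take (c : Char) (t : Nat) (U : List Char) :
    pvFront c (U.take t) = min t (pvFront c U) := by
  rw [pvFront, ← List.take_takeWhile, List.length_take, pvFront]

theorem pvBack_append_all (c : Char) (X Y : List Char) (hY : Y.all (fun x => x = c)) :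
    pvBack c (X ++ Y) = Y.length + pvBack c X := by
  have hlen : (Y.reverse.takeWhile (fun x => x = c)).length = Y.reverse.length := by
    have := pvBack_all c Y hY
    simpa [pvBack] using this
  simp [pvBack, List.takeWhile_append, hlen]

theorem pv_foldl_fixed {α β : Type} (f : β → α → β) :
    ∀ (l : List α) (st : β), (∀ x ∈ l, ∀ s, f s x = s) → l.foldl f st = st := by
  intro l
  induction l with
  | nil => intro st _; rfl
  | cons a l ih =>
    intro st h
    rw [List.foldl_cons, h a (by simp), ih st (fun x hx s => h x (by simp [hx]) s)]

theorem pv_cond_iff (L : List Char) (m : Nat) (k : Nat) (h1 : 1 ≤ k)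
    (h2 : k + 1 < (L.take m).length) :
    (PySem.List.slice L (some ((k : Int) - 1)) (some ((k : Int) + 2)) = ['A', 'R', 'C']) ↔
      (PySem.List.pyGetD (L.take m) ((k : Int) - 1) ' ' = 'A' ∧
       PySem.List.pyGetD (L.take m) (k : Int) ' ' = 'R' ∧
       PySem.List.pyGetD (L.take m) ((k : Int) + 1) ' ' = 'C') := by
  have hn_len : (L.take m).length ≤ L.length := by simp
  have hk1 : k + 1 < L.length := by omega
  have hk0 : k < L.length := by omega
  have hkm : k - 1 < L.length := by omega
  have e1 : (k : Int) - 1 = ((k - 1 : Nat) : Int) := by omega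
  have e2 : (k : Int) + 2 = ((k + 2 : Nat) : Int) := by omega
  have hslice : PySem.List.slice L (some ((k : Int) - 1)) (some ((k : Int) + 2)) =
      [L[k - 1]'hkm, L[k]'hk0, L[k + 1]'hk1] := by
    rw [e1, e2, PySem.List.slice_natCast]
    have hd1 : L.drop (k - 1) = L[k - 1]'hkm :: L.drop (k - 1 + 1) := List.drop_eq_getElem_cons hkm
    have e3 : k - 1 + 1 = k := by omega
    have hd2 : L.drop k = L[k]'hk0 :: L.drop (k + 1) := List.drop_eq_getElem_cons hk0
    have hd3 : L.drop (k + 1) = L[k + 1]'hk1 :: L.drop (k + 2) := List.drop_eq_getElem_cons hk1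
    have e4 : k + 2 - (k - 1) = 3 := by omega
    rw [e4, hd1, e3, hd2, hd3]
    rfl
  have g1 : PySem.List.pyGetD (L.take m) ((k : Int) - 1) ' ' = L[k - 1]'hkm := by
    rw [e1, PySem.List.pyGetD_eq_getElem _ ' ' (by omega) (by exact_mod_cast by omega : ((k - 1 : Nat) : Int) < ((L.take m).length : Int))]
    simp [List.getElem_take]
  have g2 : PySem.List.pyGetD (L.take m) (k : Int) ' ' = L[k]'hk0 := by
    rw [PySem.List.pyGetD_eq_getElem _ ' ' (by omega) (by exact_mod_cast by omega : ((k : Nat) : Int) < ((L.take m).length : Int))]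
    simp [List.getElem_take]
  have g3 : PySem.List.pyGetD (L.take m) ((k : Int) + 1) ' ' = L[k + 1]'hk1 := by
    have e5 : (k : Int) + 1 = ((k + 1 : Nat) : Int) := by omega
    rw [e5, PySem.List.pyGetD_eq_getElem _ ' ' (by omega) (by exact_mod_cast by omega : ((k + 1 : Nat) : Int) < ((L.take m).length : Int))]
    simp [List.getElem_take]
  rw [hslice, g1, g2, g3]
  simp

theorem pv_cond_false (L : List Char) (i : Int) (h1 : 1 ≤ i) (h2 : (L.length : Int) - 1 ≤ i) :
    ¬ (PySem.List.slice L (some (i - 1)) (some (i + 2)) = ['A', 'R', 'C']) := by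
  intro hEq
  have hk : i = ((i.toNat : Nat) : Int) := by omega
  have e1 : i - 1 = ((i.toNat - 1 : Nat) : Int) := by omega
  have e2 : i + 2 = ((i.toNat + 2 : Nat) : Int) := by omega
  rw [e1, e2, PySem.List.slice_natCast] at hEq
  have := congrArg List.length hEq
  simp [List.length_take, List.length_drop] at this
  omega

theorem pv_getT (L : List Char) (m k : Nat) (hk : k < (L.take m).length) :
    PySem.List.pyGetD (L.take m) (k : Int) ' ' =
      L[k]'(by simp [List.length_take] at hk; omega) := by
  rw [PySem.List.pyGetD_eq_getElem _ ' ' (by omega) (by exact_mod_cast hk)]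
  simp [List.getElem_take]

theorem pv_aval (L : List Char) (m k : Nat) (h1 : 1 ≤ k) (h2 : k + 1 < (L.take m).length) :
    solveRunA L ((k : Int) - 1) =
      PySem.List.pyGetD (altRuns 'A' (L.take m) 0) ((k : Int) - 1) 0 := by
  have hn_len : (L.take m).length ≤ L.length := by simp
  have hn_m : (L.take m).length ≤ m := by simp
  have e1 : (k : Int) - 1 = ((k - 1 : Nat) : Int) := by omega
  have hk1 : k - 1 < (L.take m).length := by omega
  rw [e1, PySem.List.pyGetD_eq_getElem _ 0 (by omega)
        (by rw [altRuns_length]; exact_mod_cast hk1)]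
  have etn : ((k - 1 : Nat) : Int).toNat = k - 1 := by omega
  have hget : (altRuns 'A' (L.take m) 0)[((k - 1 : Nat) : Int).toNat]'(by rw [altRuns_length]; omega) =
      (altRuns 'A' (L.take m) 0)[k - 1]'(by rw [altRuns_length]; omega) := by
    simp [etn]
  rw [hget, altRuns_getElem_zero 'A' (L.take m) (k - 1) hk1]
  have e2 : k - 1 + 1 = k := by omega
  have e3 : (L.take m).take k = L.take k := by
    rw [List.take_take]
    congr 1
    omega
  rw [e2, e3, solveRunA_eq L (k - 1) (by omega), e2]

theorem pv_cval (N : Int) (S : String) (hP : Pre_solve N S) (k : Nat) (h1 : 1 ≤ k)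
    (h2 : k + 1 < (S.toList.take (max N 0).toNat).length)
    (hA : S.toList[k - 1]? = some 'A') (hR : S.toList[k]? = some 'R') :
    solveRunC N S.toList ((k : Int) + 1) =
      PySem.List.pyGetD ((altRuns 'C' (S.toList.take (max N 0).toNat).reverse 0).reverse)
        ((k : Int) + 1) 0 := by
  set L := S.toList with hL
  set m := (max N 0).toNat with hm
  set T := L.take m with hT
  have hn_len : T.length ≤ L.length := by simp [hT]
  have hn_m : T.length ≤ m := by simp [hT]
  have hmN : (m : Int) = max N 0 := by
    rw [hm]; exact Int.toNat_of_nonneg (le_max_right N 0)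
  have e1 : (k : Int) + 1 = ((k + 1 : Nat) : Int) := by omega
  have hk1 : k + 1 < T.length := h2
  rw [e1, PySem.List.pyGetD_eq_getElem _ 0 (by omega)
        (by simp only [List.length_reverse, altRuns_length]; exact_mod_cast hk1)]
  have etn : ((k + 1 : Nat) : Int).toNat = k + 1 := by omega
  have hget : ((altRuns 'C' T.reverse 0).reverse)[((k + 1 : Nat) : Int).toNat]'(by simp only [List.length_reverse, altRuns_length]; omega) =
      ((altRuns 'C' T.reverse 0).reverse)[k + 1]'(by simp only [List.length_reverse, altRuns_length]; omega) := by
    simp [etn]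
  rw [hget, cRun_getElem T (k + 1) hk1]
  by_cases hNlen : N ≤ (L.length : Int)
  · -- the loop bound N lies inside the string: the while-loop is truncation by N
    have hmlen : m ≤ L.length := by omega
    have hn : T.length = m := by simp [hT]; omega
    have hNm : N = (m : Int) := by omega
    rw [solveRunC_bounded N L ((N - ((k + 1 : Nat) : Int)).toNat) ((k + 1 : Nat) : Int) le_rfl
          (by omega) (by omega) hNlen]
    have hdt : T.drop (k + 1) = (L.drop (k + 1)).take (m - (k + 1)) := by
      rw [hT, List.drop_take]
    rw [etn, hdt, pvFront_take]
    push_cast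
    omega
  · -- N runs past the string: inside Pre_ the C-run stops strictly before the end
    have hTL : T = L := by
      rw [hT]
      exact List.take_of_length_le (by omega)
    have hflen : pvFront 'C' (L.drop (k + 1)) ≤ L.length - (k + 1) := by
      have h := (List.takeWhile_prefix (l := L.drop (k + 1)) (fun x => x = 'C')).length_le
      simpa [pvFront] using h
    have hkn : k + 1 < L.length := by rw [← hTL]; omega
    have hRk : L[k]'(by omega) = 'R' := by
      obtain ⟨h', hv⟩ := List.getElem?_eq_some_iff.mp hR
      exact hv
    have hAk : L[k - 1]'(by omega) = 'A' := by
      obtain ⟨h', hv⟩ := List.getElem?_eq_some_iff.mp hA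
      exact hv
    have hstop : k + 1 + pvFront 'C' (L.drop (k + 1)) < L.length := by
      by_contra hcon
      have hfeq : pvFront 'C' (L.drop (k + 1)) = L.length - (k + 1) := by omega
      have hall : (L.drop (k + 1)).all (fun x => x = 'C') := by
        have hpre := List.takeWhile_prefix (l := L.drop (k + 1)) (fun x => x = 'C')
        have hlen1 : ((L.drop (k + 1)).takeWhile (fun x => x = 'C')).length = (L.drop (k + 1)).length := by
          have hld : (L.drop (k + 1)).length = L.length - (k + 1) := by simp
          simpa [pvFront, hld] using hfeq
        have heq := hpre.eq_of_length hlen1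
        exact List.all_eq_true.mpr (List.takeWhile_eq_self_iff.mp heq)
      exfalso
      apply hP
      have htr : pvBack 'C' L = L.length - (k + 1) := by
        have hsplit : L = L.take (k + 1) ++ L.drop (k + 1) := (List.take_append_drop (k + 1) L).symm
        have hstep : pvBack 'C' (L.take (k + 1) ++ L.drop (k + 1)) =
            (L.drop (k + 1)).length + pvBack 'C' (L.take (k + 1)) :=
          pvBack_append_all 'C' _ _ hall
        have htk : L.take (k + 1) = L.take k ++ [L[k]'(by omega)] := by
          simpa using List.take_succ_eq_append_getElem (by omega : k < L.length)
        have hz : pvBack 'C' (L.take (k + 1)) = 0 := by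
          rw [htk, pvBack_append_ne 'C' _ _ (by rw [hRk]; decide)]
        rw [← hsplit] at hstep
        rw [hstep, hz, List.length_drop]
        omega
      show (S.toList.length : Int) < N ∧ 1 ≤ pvBack 'C' S.toList ∧
          pvBack 'C' S.toList + 2 ≤ S.toList.length ∧
          S.toList[S.toList.length - pvBack 'C' S.toList - 2]? = some 'A' ∧
          S.toList[S.toList.length - pvBack 'C' S.toList - 1]? = some 'R'
      refine ⟨by simp only [← hL]; omega, ?_, ?_, ?_, ?_⟩
      · simp only [← hL]
        rw [htr]
        omega
      · simp only [← hL]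
        rw [htr]
        omega
      · simp only [← hL]
        rw [htr]
        have e6 : L.length - (L.length - (k + 1)) - 2 = k - 1 := by omega
        rw [e6]
        exact hA
      · simp only [← hL]
        rw [htr]
        have e7 : L.length - (L.length - (k + 1)) - 1 = k := by omega
        rw [e7]
        exact hR
    rw [solveRunC_inner N L (pvFront 'C' (L.drop (((k + 1 : Nat) : Int).toNat))) ((k + 1 : Nat) : Int) rfl (by omega)
          (by simp only [etn]; omega) (by simp only [etn]; push_cast; omega)]
    simp only [etn, hTL]

theorem pv_step (N : Int) (S : String) (hP : Pre_solve N S) (i : Int) (h1 : 1 ≤ i)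
    (h2 : i < ((S.toList.take (max N 0).toNat).length : Int) - 1) (st : Int × Int) :
    (if PySem.List.slice S.toList (some (i - 1)) (some (i + 2)) = ['A', 'R', 'C'] then
       (st.1 + 1, st.2 + min (solveRunA S.toList (i - 1)) (solveRunC N S.toList (i + 1)))
     else st) =
    (if PySem.List.pyGetD (S.toList.take (max N 0).toNat) (i - 1) ' ' = 'A' ∧
        PySem.List.pyGetD (S.toList.take (max N 0).toNat) i ' ' = 'R' ∧
        PySem.List.pyGetD (S.toList.take (max N 0).toNat) (i + 1) ' ' = 'C' then
       (st.1 + 1, st.2 +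
         min (PySem.List.pyGetD (altRuns 'A' (S.toList.take (max N 0).toNat) 0) (i - 1) 0)
           (PySem.List.pyGetD ((altRuns 'C' (S.toList.take (max N 0).toNat).reverse 0).reverse) (i + 1) 0))
     else st) := by
  obtain ⟨k, rfl⟩ : ∃ k : Nat, i = (k : Int) := ⟨i.toNat, by omega⟩
  have hlenle : (S.toList.take (max N 0).toNat).length ≤ S.toList.length := by simp
  have hk1 : 1 ≤ k := by omega
  have hk2 : k + 1 < (S.toList.take (max N 0).toNat).length := by omega
  have hcond := pv_cond_iff S.toList (max N 0).toNat k hk1 hk2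
  by_cases hc : PySem.List.slice S.toList (some ((k : Int) - 1)) (some ((k : Int) + 2)) = ['A', 'R', 'C']
  · have hb := hcond.mp hc
    have e1 : (k : Int) - 1 = ((k - 1 : Nat) : Int) := by omega
    have hA : S.toList[k - 1]? = some 'A' := by
      have hg := pv_getT S.toList (max N 0).toNat (k - 1) (by omega)
      rw [e1, hg] at hb
      rw [List.getElem?_eq_getElem (by omega), hb.1]
    have hR : S.toList[k]? = some 'R' := by
      have hg := pv_getT S.toList (max N 0).toNat k (by omega)
      rw [hg] at hb
      rw [List.getElem?_eq_getElem (by omega), hb.2.1]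
    rw [if_pos hc, if_pos hb, pv_aval S.toList (max N 0).toNat k hk1 hk2,
        pv_cval N S hP k hk1 hk2 hA hR]
  · rw [if_neg hc, if_neg (fun hb => hc (hcond.mpr hb))]

theorem pv_main (N : Int) (S : String) (hP : Pre_solve N S) : solve N S = solve_alt N S := by
  have hslice : PySem.List.slice S.toList none (some (max N 0)) = S.toList.take (max N 0).toNat := by
    have h := PySem.List.slice_to_natCast S.toList (max N 0).toNat
    rwa [Int.toNat_of_nonneg (le_max_right N 0)] at h
  simp only [solve, solve_alt, hslice]
  have hmN : ((max N 0).toNat : Int) = max N 0 := Int.toNat_of_nonneg (le_max_right N 0)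
  have hnm : (S.toList.take (max N 0).toNat).length ≤ (max N 0).toNat := by simp
  have hnlen : (S.toList.take (max N 0).toNat).length ≤ S.toList.length := by simp
  have hfold : List.foldl (fun (st : Int × Int) i =>
      if PySem.List.slice S.toList (some (i - 1)) (some (i + 2)) = ['A', 'R', 'C'] then
        (st.1 + 1, st.2 + min (solveRunA S.toList (i - 1)) (solveRunC N S.toList (i + 1)))
      else st) (0, 0) (PySem.List.pyRange 1 (N - 1) 1) =
    List.foldl (fun (st : Int × Int) i =>
      if PySem.List.pyGetD (S.toList.take (max N 0).toNat) (i - 1) ' ' = 'A' ∧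
         PySem.List.pyGetD (S.toList.take (max N 0).toNat) i ' ' = 'R' ∧
         PySem.List.pyGetD (S.toList.take (max N 0).toNat) (i + 1) ' ' = 'C' then
        (st.1 + 1, st.2 +
          min (PySem.List.pyGetD (altRuns 'A' (S.toList.take (max N 0).toNat) 0) (i - 1) 0)
            (PySem.List.pyGetD ((altRuns 'C' (S.toList.take (max N 0).toNat).reverse 0).reverse) (i + 1) 0))
      else st) (0, 0)
      (PySem.List.pyRange 1 (((S.toList.take (max N 0).toNat).length : Int) - 1) 1) := by
    by_cases hNlen : N ≤ (S.toList.length : Int)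
    · have hrange : PySem.List.pyRange 1 (N - 1) 1 =
          PySem.List.pyRange 1 (((S.toList.take (max N 0).toNat).length : Int) - 1) 1 := by
        by_cases hN0 : N ≤ 1
        · rw [PySem.List.pyRange_one_eq_nil (by omega), PySem.List.pyRange_one_eq_nil (by omega)]
        · have hlen : ((S.toList.take (max N 0).toNat).length : Int) = N := by
            have h1 : (S.toList.take (max N 0).toNat).length =
                min (max N 0).toNat S.toList.length := by simp [List.length_take]
            rw [h1]
            push_cast
            omega
          rw [hlen]
      rw [hrange]
      exact PySem.List.foldl_congr_mem _ _ _ _ (fun acc x hx => by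
        rw [PySem.List.mem_pyRange_one] at hx
        exact pv_step N S hP x hx.1 (by omega) acc)
    · have hTL : S.toList.take (max N 0).toNat = S.toList :=
        List.take_of_length_le (by omega)
      by_cases hn2 : 2 ≤ S.toList.length
      · rw [PySem.List.pyRange_one_append 1 (((S.toList.take (max N 0).toNat).length : Int) - 1)
              (N - 1) (by rw [hTL]; omega) (by rw [hTL]; omega),
            List.foldl_append]
        rw [pv_foldl_fixed _ _ _ (fun x hx s => by
          rw [PySem.List.mem_pyRange_one] at hx
          rw [if_neg (pv_cond_false S.toList x (by rw [hTL] at hx; omega)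
                (by rw [hTL] at hx; omega))])]
        exact PySem.List.foldl_congr_mem _ _ _ _ (fun acc x hx => by
          rw [PySem.List.mem_pyRange_one] at hx
          exact pv_step N S hP x hx.1 (by omega) acc)
      · rw [pv_foldl_fixed _ _ _ (fun x hx s => by
          rw [PySem.List.mem_pyRange_one] at hx
          rw [if_neg (pv_cond_false S.toList x (by omega) (by omega))])]
        rw [PySem.List.pyRange_one_eq_nil (by omega)]
        rfl
  rw [hfold, Int.mul_comm]

-- ===== VERDICT (by name: the statement is the Claim_ definition above) =====
theorem solve_spec : Claim_equal_solve := by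
  unfold Claim_equal_solve
  intro N S _ hP
  unfold Spec_solve
  exact pv_main N S hP
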